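-- pv_equiv track=rewrite | github.com/DiaZa13/AED_Proyecto2 | Subrutinas.py | determinateRecommendation
-- ===== SOURCE A (Python) =====
-- def determinateRecommendation(zoneRestaurants,moneyRestaurants,scoreRestaurants,typeRestaurants):
--     recommendation = []
--     for restaurant in zoneRestaurants:
--         if restaurant in moneyRestaurants:
--             recommendation.append(restaurant)
--     for restaurant in zoneRestaurants:
--         if restaurant in scoreRestaurants:
--             recommendation.append(restaurant)
--     for restaurant in zoneRestaurants:
--         if restaurant in moneyRestaurants:
--             recommendation.append(restaurant)
--
--     return recommendation
-- ===== SOURCE B (Python) =====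
-- def determinateRecommendation(zoneRestaurants, moneyRestaurants, scoreRestaurants, typeRestaurants):
--     moneyList = []
--     scoreList = []
--     for restaurant in zoneRestaurants:
--         if restaurant in moneyRestaurants:
--             moneyList.append(restaurant)
--         if restaurant in scoreRestaurants:
--             scoreList.append(restaurant)
--     return moneyList + scoreList + moneyList
-- ===== Notes on version B (the rewrite author's own statement) =====
-- stated objective: simpler
-- what changed: Single pass over zoneRestaurants maintaining money and score accumulators at once, then money+score+money, computing the money segment once instead of scanning zoneRestaurants three times.
import Mathlib
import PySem

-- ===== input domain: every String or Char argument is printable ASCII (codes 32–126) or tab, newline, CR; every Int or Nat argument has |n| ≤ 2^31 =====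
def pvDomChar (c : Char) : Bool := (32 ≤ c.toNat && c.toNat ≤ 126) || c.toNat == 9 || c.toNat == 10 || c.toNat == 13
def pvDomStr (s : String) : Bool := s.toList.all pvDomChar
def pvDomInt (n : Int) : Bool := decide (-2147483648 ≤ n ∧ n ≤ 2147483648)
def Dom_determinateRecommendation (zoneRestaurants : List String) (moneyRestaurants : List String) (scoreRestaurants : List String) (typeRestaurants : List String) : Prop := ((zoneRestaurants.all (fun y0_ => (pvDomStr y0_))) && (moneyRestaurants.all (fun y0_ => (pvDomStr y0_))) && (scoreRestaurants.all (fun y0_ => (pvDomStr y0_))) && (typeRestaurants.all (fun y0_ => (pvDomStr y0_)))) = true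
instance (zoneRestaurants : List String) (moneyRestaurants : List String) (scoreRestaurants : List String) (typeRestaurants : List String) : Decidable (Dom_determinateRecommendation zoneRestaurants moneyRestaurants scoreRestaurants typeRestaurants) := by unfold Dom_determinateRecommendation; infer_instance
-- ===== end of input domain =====

-- ===== PORT A =====
-- Three sequential loops over zoneRestaurants, each appending matching restaurants.
def determinateRecommendation (zoneRestaurants : List String) (moneyRestaurants : List String) (scoreRestaurants : List String) (typeRestaurants : List String) : List String :=
  let r1 := zoneRestaurants.foldl (fun acc r => if moneyRestaurants.contains r then acc ++ [r] else acc) []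
  let r2 := zoneRestaurants.foldl (fun acc r => if scoreRestaurants.contains r then acc ++ [r] else acc) r1
  zoneRestaurants.foldl (fun acc r => if moneyRestaurants.contains r then acc ++ [r] else acc) r2

-- ===== PORT B =====
-- B: one pass maintaining the money and score accumulators together, then money ++ score ++ money.
def determinateRecommendation_alt (zoneRestaurants : List String) (moneyRestaurants : List String) (scoreRestaurants : List String) (typeRestaurants : List String) : List String :=
  let p := zoneRestaurants.foldl (fun (acc : List String × List String) r =>
      (if moneyRestaurants.contains r then acc.1 ++ [r] else acc.1,
       if scoreRestaurants.contains r then acc.2 ++ [r] else acc.2)) ([], [])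
  p.1 ++ p.2 ++ p.1

-- ===== PRECONDITION & SPEC =====
def Spec_determinateRecommendation (zoneRestaurants : List String) (moneyRestaurants : List String) (scoreRestaurants : List String) (typeRestaurants : List String) (out : List String) : Prop := out = determinateRecommendation_alt zoneRestaurants moneyRestaurants scoreRestaurants typeRestaurants
instance (zoneRestaurants : List String) (moneyRestaurants : List String) (scoreRestaurants : List String) (typeRestaurants : List String) (out : List String) : Decidable (Spec_determinateRecommendation zoneRestaurants moneyRestaurants scoreRestaurants typeRestaurants out) := by unfold Spec_determinateRecommendation; infer_instance

-- ===== CLAIM (what is proved, stated in full; the proofs are below) =====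
def Claim_equal_determinateRecommendation : Prop := ∀ (zoneRestaurants : List String) (moneyRestaurants : List String) (scoreRestaurants : List String) (typeRestaurants : List String), Dom_determinateRecommendation zoneRestaurants moneyRestaurants scoreRestaurants typeRestaurants → Spec_determinateRecommendation zoneRestaurants moneyRestaurants scoreRestaurants typeRestaurants (determinateRecommendation zoneRestaurants moneyRestaurants scoreRestaurants typeRestaurants)

-- ===== LEMMAS AND PROOFS =====

-- ===== VERDICT (by name: the statement is the Claim_ definition above) =====
theorem determinateRecommendation_spec : Claim_equal_determinateRecommendation := by
  intro z m s t _
  unfold Spec_determinateRecommendation determinateRecommendation determinateRecommendation_alt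
  rw [PySem.List.foldl_prod_mk
        (f := fun acc r => if m.contains r then acc ++ [r] else acc)
        (g := fun acc r => if s.contains r then acc ++ [r] else acc)]
  rw [PySem.List.foldl_append_if_eq_filter, PySem.List.foldl_append_if_eq_filter,
      PySem.List.foldl_append_if_eq_filter, PySem.List.foldl_append_if_eq_filter]
  simp [List.append_assoc]
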